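-- pv_equiv track=rewrite | github.com/pypi-data/pypi-mirror-397 | packages/credtools/credtools-0.3.2-py3-none-any.whl/credtools/utils.py | get_float_format
-- ===== SOURCE A (Python) =====
-- from typing import Any, Callable, Dict, List, Optional, TypeVar, Union
--
-- def get_float_format(col_name: str) -> Optional[str]:
--     """
--     Get appropriate float format for a column based on its name.
--
--     Parameters
--     ----------
--     col_name : str
--         Column name.
--
--     Returns
--     -------
--     Optional[str]
--         Format string or None for default formatting.
--     """
--     col_lower = col_name.lower()
--
--     # P-values get scientific notation
--     if col_lower.endswith("_p") or col_lower == "p":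
--         return "%.3e"
--
--     # EAF, MAF, PIP, R2 get 4 decimal places
--     elif any(col_lower.endswith(suffix) for suffix in ["_eaf", "_maf", "_pip", "_r2"]):
--         return "%.4f"
--     elif col_lower in ["eaf", "maf", "pip", "r2"]:
--         return "%.4f"
--
--     # BETA and SE get 4 decimal places
--     elif col_lower.endswith("_beta") or col_lower.endswith("_se"):
--         return "%.4f"
--     elif col_lower in ["beta", "se"]:
--         return "%.4f"
--
--     # Default: no special formatting
--     return None
-- ===== SOURCE B (Python) =====
-- _FORMATS = {"p": "%.3e", "eaf": "%.4f", "maf": "%.4f", "pip": "%.4f",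
--             "r2": "%.4f", "beta": "%.4f", "se": "%.4f"}
--
--
-- def get_float_format(col_name: str):
--     # The whole cascade only ever looks at the last "_"-separated token:
--     # "x endswith '_w' or x == 'w'" is exactly "last token of x == 'w'".
--     return _FORMATS.get(col_name.lower().rsplit("_", 1)[-1])
-- ===== Notes on version B (the rewrite author's own statement) =====
-- stated objective: simpler
-- what changed: B lowercases once, extracts the last underscore-separated token (rsplit with maxsplit 1), and answers with a single dict lookup, replacing A's six-branch cascade of thirteen suffix/equality tests; this is correct because ending in underscore-plus-word or equalling the bare word is exactly the same as the last token equalling that word.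
import Mathlib
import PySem

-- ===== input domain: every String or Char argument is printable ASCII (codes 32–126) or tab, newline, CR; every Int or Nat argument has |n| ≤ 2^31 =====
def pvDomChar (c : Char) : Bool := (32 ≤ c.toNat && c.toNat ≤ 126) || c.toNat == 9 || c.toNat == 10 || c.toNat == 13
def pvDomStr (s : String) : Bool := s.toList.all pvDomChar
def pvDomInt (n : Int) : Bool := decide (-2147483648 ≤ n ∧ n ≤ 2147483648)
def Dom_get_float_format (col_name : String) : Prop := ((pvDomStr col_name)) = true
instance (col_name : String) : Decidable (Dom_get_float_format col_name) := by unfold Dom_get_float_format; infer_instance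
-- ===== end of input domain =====

-- B replaces A's if/elif cascade of suffix/equality tests by extracting the last '_'-separated
-- token once and doing a single dict lookup (simpler decomposition; same cost).


-- ===== PORT A =====
-- literal transliteration of A's if/elif cascade
def get_float_format (col_name : String) : Option String :=
  let col_lower := PySem.Str.lower col_name
  if PySem.Str.endswith col_lower "_p" || (col_lower == "p") then some "%.3e"
  else if (["_eaf", "_maf", "_pip", "_r2"].any (fun suffix => PySem.Str.endswith col_lower suffix)) then some "%.4f"
  else if (["eaf", "maf", "pip", "r2"].any (fun x => col_lower == x)) then some "%.4f"
  else if PySem.Str.endswith col_lower "_beta" || PySem.Str.endswith col_lower "_se" then some "%.4f"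
  else if (["beta", "se"].any (fun x => col_lower == x)) then some "%.4f"
  else none

-- ===== PORT B =====
-- B's module-level dict _FORMATS
def pvFormats : PySem.Dict String String :=
  PySem.Dict.ofList [("p", "%.3e"), ("eaf", "%.4f"), ("maf", "%.4f"), ("pip", "%.4f"),
                     ("r2", "%.4f"), ("beta", "%.4f"), ("se", "%.4f")]

-- hand port of s.rsplit("_", 1)[-1]: the characters after the last '_' (the whole string if none);
-- exact on all strings.
def pvLastTok (cs : List Char) : List Char :=
  (cs.reverse.takeWhile (fun c => c != '_')).reverse

def get_float_format_alt (col_name : String) : Option String :=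
  pvFormats.get? (String.ofList (pvLastTok (PySem.Str.lower col_name).toList))

-- ===== PRECONDITION & SPEC =====
def Spec_get_float_format (col_name : String) (out : Option String) : Prop := out = get_float_format_alt col_name
instance (col_name : String) (out : Option String) : Decidable (Spec_get_float_format col_name out) := by unfold Spec_get_float_format; infer_instance

-- ===== CLAIM (what is proved, stated in full; the proofs are below) =====
def Claim_equal_get_float_format : Prop := ∀ (col_name : String), Dom_get_float_format col_name → Spec_get_float_format col_name (get_float_format col_name)

-- ===== LEMMAS AND PROOFS =====

lemma takeWhile_append_stop (w rest : List Char) (hw : '_' ∉ w) :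
    (w ++ '_' :: rest).takeWhile (fun c => c != '_') = w := by
  induction w with
  | nil => simp
  | cons a t ih =>
    have ha : a ≠ '_' := fun h => hw (h ▸ List.mem_cons_self ..)
    simp only [List.cons_append, List.takeWhile_cons]
    simp [ha, ih (fun h => hw (List.mem_cons_of_mem _ h))]

lemma takeWhile_of_not_mem (R : List Char) (h : '_' ∉ R) :
    R.takeWhile (fun c => c != '_') = R := by
  induction R with
  | nil => rfl
  | cons a t ih =>
    have ha : a ≠ '_' := fun hh => h (hh ▸ List.mem_cons_self ..)
    simp [ha, ih (fun hh => h (List.mem_cons_of_mem _ hh))]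

-- key: for an underscore-free word w, "L ends with '_'::w or L = w" ⟺ last token of L is w
lemma key (L w : List Char) (hw : '_' ∉ w) :
    (('_' :: w) <:+ L ∨ L = w) ↔ pvLastTok L = w := by
  unfold pvLastTok
  constructor
  · rintro (⟨pre, rfl⟩ | rfl)
    · rw [show (pre ++ '_' :: w).reverse = w.reverse ++ '_' :: pre.reverse by simp,
        takeWhile_append_stop _ _ (by simpa using hw)]
      simp
    · rw [takeWhile_of_not_mem _ (by simpa using hw)]; simp
  · intro h
    have h' : List.takeWhile (fun c => c != '_') L.reverse = w.reverse := by
      have := congrArg List.reverse h; simpa using this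
    have hsplit := List.takeWhile_append_dropWhile (p := fun c => c != '_') (l := L.reverse)
    rw [h'] at hsplit
    cases hdr : L.reverse.dropWhile (fun c => c != '_') with
    | nil =>
      right
      rw [hdr, List.append_nil] at hsplit
      have := congrArg List.reverse hsplit
      first | simpa using this | simpa using this.symm
    | cons c rest =>
      left
      have hc : ¬ (c != '_') = true := by
        have := List.head?_dropWhile_not (p := fun c => c != '_') (l := L.reverse)
        rw [hdr] at this; simpa using this
      have hc' : c = '_' := by simpa using hc
      subst hc'
      refine ⟨rest.reverse, ?_⟩
      rw [hdr] at hsplit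
      have := congrArg List.reverse hsplit
      simpa using this

-- Bool form of `key`, matching the ports' conditions
lemma keyB (l sfx w : String) (hs : sfx.toList = '_' :: w.toList) (hw : '_' ∉ w.toList) :
    (PySem.Str.endswith l sfx || (l == w)) = (pvLastTok l.toList == w.toList) := by
  rw [Bool.eq_iff_iff]
  simp only [Bool.or_eq_true, beq_iff_eq, PySem.Str.endswith_eq, hs, PySem.Chars.endswith_iff,
    ← String.toList_inj]
  exact key l.toList w.toList hw

lemma if_merge (a b : Bool) (v w : Option String) :
    (if a then v else if b then v else w) = (if (a || b) then v else w) := by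
  cases a <;> cases b <;> simp

lemma regroup (a1 a2 a3 a4 b1 b2 b3 b4 c1 c2 d1 d2 : Bool) :
    (((((a1 || (a2 || (a3 || a4))) || (b1 || (b2 || (b3 || b4)))) || (c1 || c2)) || (d1 || d2))
      = ((a1 || b1) || ((a2 || b2) || ((a3 || b3) || ((a4 || b4) || ((c1 || d1) || (c2 || d2))))))) := by
  cases a1 <;> cases a2 <;> cases a3 <;> cases a4 <;> cases b1 <;> cases b2 <;> cases b3
    <;> cases b4 <;> cases c1 <;> cases c2 <;> cases d1 <;> cases d2 <;> rfl

lemma beq_ofList (w : String) (t : List Char) : (w == String.ofList t) = (t == w.toList) := by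
  rw [Bool.eq_iff_iff, beq_iff_eq, beq_iff_eq, ← String.toList_inj, String.toList_ofList]
  exact eq_comm

lemma formats_get (x : String) :
    pvFormats.get? x =
      if "p" == x then some "%.3e"
      else if "eaf" == x then some "%.4f"
      else if "maf" == x then some "%.4f"
      else if "pip" == x then some "%.4f"
      else if "r2" == x then some "%.4f"
      else if "beta" == x then some "%.4f"
      else if "se" == x then some "%.4f"
      else none := by
  have h : pvFormats = PySem.Dict.mk [("p", "%.3e"), ("eaf", "%.4f"), ("maf", "%.4f"),
      ("pip", "%.4f"), ("r2", "%.4f"), ("beta", "%.4f"), ("se", "%.4f")] := by decide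
  rw [h]
  simp only [PySem.Dict.get?_mk_cons]
  simp [PySem.Dict.get?]

-- ===== VERDICT (by name: the statement is the Claim_ definition above) =====
theorem get_float_format_spec : Claim_equal_get_float_format := by
  intro col_name _
  unfold Spec_get_float_format get_float_format get_float_format_alt
  simp only [List.any_cons, List.any_nil, Bool.or_false]
  rw [if_merge, if_merge, if_merge, regroup,
    keyB _ "_p" "p" rfl (by decide),
    keyB _ "_eaf" "eaf" rfl (by decide),
    keyB _ "_maf" "maf" rfl (by decide),
    keyB _ "_pip" "pip" rfl (by decide),
    keyB _ "_r2" "r2" rfl (by decide),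
    keyB _ "_beta" "beta" rfl (by decide),
    keyB _ "_se" "se" rfl (by decide),
    formats_get, beq_ofList, beq_ofList, beq_ofList, beq_ofList, beq_ofList, beq_ofList, beq_ofList]
  generalize pvLastTok (PySem.Str.lower col_name).toList = t
  generalize (t == "p".toList) = q1
  generalize (t == "eaf".toList) = q2
  generalize (t == "maf".toList) = q3
  generalize (t == "pip".toList) = q4
  generalize (t == "r2".toList) = q5
  generalize (t == "beta".toList) = q6
  generalize (t == "se".toList) = q7
  cases q1 <;> cases q2 <;> cases q3 <;> cases q4 <;> cases q5 <;> cases q6 <;> cases q7 <;> rfl
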